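-- pv_equiv track=rewrite | github.com/GetPastTheMonkey/advent-of-code | aoc2023/day22/day22_part2.py | num_fallen
-- ===== SOURCE A (Python) =====
-- def num_fallen(dependencies: list[set[int]], floor_bricks: set[int], removed: set[int]) -> int:
--     unsupported = set()  # type: set[int]
--
--     for idx in range(len(dependencies)):
--         if idx in removed:
--             # This brick has already been removed
--             continue
--
--         if idx in floor_bricks:
--             # This brick is supported by the floor and can never fall
--             continue
--
--         remaining_deps = dependencies[idx] - removed
--
--         if len(remaining_deps) > 0:
--             # The brick is still supported by another non-removed brick
--             continue
--
--         # At this point, the brick with this index is not supported by any other brick or the ground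
--         unsupported.add(idx)
--
--     if len(unsupported) == 0:
--         # Base condition --> There are no unsupported bricks
--         return 0
--
--     # Recursive --> See how removing the unsupported bricks propagates through the system
--     # As unsupported is not empty, the removed bricks are strictly increasing. This guarantees termination.
--     return len(unsupported) + num_fallen(dependencies, floor_bricks, removed | unsupported)
-- ===== SOURCE B (Python) =====
-- def num_fallen(dependencies: list[set[int]], floor_bricks: set[int], removed: set[int]) -> int:
--     n = len(dependencies)
--
--     # Reverse-dependency index: rev[d] = candidate bricks (not removed, not on the
--     # floor) that rest on brick d.  Built once; afterwards only the neighbours of a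
--     # brick that has just fallen are re-examined, instead of every brick every round.
--     rev = {}
--     for i in range(n):
--         if i in removed or i in floor_bricks:
--             continue
--         for d in dependencies[i]:
--             rev.setdefault(d, []).append(i)
--
--     fallen = set()
--     queue = []  # worklist; doubles as the insertion-ordered list of fallen bricks
--     for i in range(n):
--         if i not in removed and i not in floor_bricks and all(d in removed for d in dependencies[i]):
--             fallen.add(i)
--             queue.append(i)
--
--     head = 0
--     while head < len(queue):
--         j = queue[head]
--         head += 1
--         for i in rev.get(j, ()):
--             if i not in fallen and all(d in removed or d in fallen for d in dependencies[i]):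
--                 fallen.add(i)
--                 queue.append(i)
--
--     return len(queue)
-- ===== Notes on version B (the rewrite author's own statement) =====
-- stated objective: alternative
-- what changed: A recomputes, in every recursive round, the full set of currently-unsupported bricks by scanning all n bricks and re-deriving each brick's remaining supports; B builds a reverse-dependency index once and runs a single worklist pass that re-examines only the neighbours of each newly fallen brick.
import Mathlib
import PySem

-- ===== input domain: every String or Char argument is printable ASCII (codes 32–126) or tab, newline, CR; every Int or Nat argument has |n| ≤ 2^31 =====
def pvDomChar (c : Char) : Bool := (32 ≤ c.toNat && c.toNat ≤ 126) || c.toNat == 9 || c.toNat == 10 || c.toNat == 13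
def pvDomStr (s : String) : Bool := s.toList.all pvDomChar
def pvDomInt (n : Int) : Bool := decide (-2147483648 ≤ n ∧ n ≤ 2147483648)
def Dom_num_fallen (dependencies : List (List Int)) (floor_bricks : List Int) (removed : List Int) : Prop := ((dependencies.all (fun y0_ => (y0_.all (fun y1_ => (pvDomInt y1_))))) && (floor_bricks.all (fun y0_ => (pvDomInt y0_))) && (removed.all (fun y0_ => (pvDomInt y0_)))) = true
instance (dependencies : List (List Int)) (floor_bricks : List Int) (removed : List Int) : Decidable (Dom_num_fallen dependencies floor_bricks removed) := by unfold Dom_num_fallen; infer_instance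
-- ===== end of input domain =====

-- B replaces A's whole-array fixpoint rounds by a reverse-dependency index and a worklist
-- that re-examines only the neighbours of newly fallen bricks (objective: alternative).

-- ===== PORT A =====
-- One round of A's body: the set of bricks that are unsupported given `removed`.
def pvUnsupported (dependencies : List (List Int)) (floor_bricks removed : List Int) : PySem.Set Int :=
  (PySem.List.pyRange 0 (dependencies.length : Int) 1).foldl (fun unsupported idx =>
    if idx ∈ removed then unsupported
    else if idx ∈ floor_bricks then unsupported
    else if 0 < (PySem.Set.diff (PySem.Set.ofList (PySem.List.pyGetD dependencies idx [])) removed).length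
      then unsupported
      else PySem.Set.add unsupported idx) PySem.Set.empty

-- A's recursion, on fuel.  Fuel `length + 1` is provably sufficient: every recursive call
-- unions a nonempty set of fresh indices of range(n) into `removed` (lemma pvRem_drop below),
-- so the fuel-0 branch is never reached.
def num_fallenFuel (dependencies : List (List Int)) (floor_bricks : List Int) : Nat → List Int → Int
  | 0, _ => 0
  | fuel + 1, removed =>
    let unsupported := pvUnsupported dependencies floor_bricks removed
    if unsupported.length = 0 then 0
    else (unsupported.length : Int) +
      num_fallenFuel dependencies floor_bricks fuel (PySem.Set.union (PySem.Set.ofList removed) unsupported)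

def num_fallen (dependencies : List (List Int)) (floor_bricks : List Int) (removed : List Int) : Int :=
  num_fallenFuel dependencies floor_bricks (dependencies.length + 1) removed

-- ===== PORT B =====
-- rev[d] = candidate bricks (not removed, not floor) that rest on brick d.
def pvRev (dependencies : List (List Int)) (floor_bricks removed : List Int) : PySem.Dict Int (List Int) :=
  (PySem.List.pyRange 0 (dependencies.length : Int) 1).foldl (fun rev i =>
    if i ∈ removed then rev
    else if i ∈ floor_bricks then rev
    else (PySem.List.pyGetD dependencies i []).foldl
      (fun rev d => rev.modify d [] (fun l => l ++ [i])) rev) PySem.Dict.empty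

-- the initial worklist: bricks falling immediately
def pvSeed (dependencies : List (List Int)) (floor_bricks removed : List Int) : List Int :=
  (PySem.List.pyRange 0 (dependencies.length : Int) 1).foldl (fun queue i =>
    if i ∉ removed ∧ i ∉ floor_bricks ∧
        (PySem.List.pyGetD dependencies i []).all (fun d => decide (d ∈ removed)) then
      queue ++ [i]
    else queue) []

-- the worklist loop (Source B's `while head < len(queue)`), on fuel; each iteration pops one
-- element, and at most `length` distinct bricks are ever enqueued, so fuel `length` is
-- provably sufficient (and when it runs out with head = len the returned value is the same).
def pvBfs (dependencies : List (List Int)) (removed : List Int)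
    (rev : PySem.Dict Int (List Int)) : Nat → Nat → List Int → List Int
  | 0, _, queue => queue
  | fuel + 1, head, queue =>
    if h : head < queue.length then
      let j := queue[head]
      let queue' := (rev.getD j []).foldl (fun q i =>
        if i ∈ q then q
        else if (PySem.List.pyGetD dependencies i []).all
            (fun d => decide (d ∈ removed) || decide (d ∈ q)) then q ++ [i]
        else q) queue
      pvBfs dependencies removed rev fuel (head + 1) queue'
    else queue

def num_fallen_alt (dependencies : List (List Int)) (floor_bricks : List Int) (removed : List Int) : Int :=
  let rev := pvRev dependencies floor_bricks removed
  let queue := pvSeed dependencies floor_bricks removed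
  ((pvBfs dependencies removed rev dependencies.length 0 queue).length : Int)

-- ===== PRECONDITION & SPEC =====
def Spec_num_fallen (dependencies : List (List Int)) (floor_bricks : List Int) (removed : List Int) (out : Int) : Prop := out = num_fallen_alt dependencies floor_bricks removed
instance (dependencies : List (List Int)) (floor_bricks : List Int) (removed : List Int) (out : Int) : Decidable (Spec_num_fallen dependencies floor_bricks removed out) := by unfold Spec_num_fallen; infer_instance

-- ===== CLAIM (what is proved, stated in full; the proofs are below) =====
def Claim_equal_num_fallen : Prop := ∀ (dependencies : List (List Int)) (floor_bricks : List Int) (removed : List Int), Dom_num_fallen dependencies floor_bricks removed → Spec_num_fallen dependencies floor_bricks removed (num_fallen dependencies floor_bricks removed)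

-- ===== LEMMAS AND PROOFS =====

-- The common specification: brick i eventually falls (the least set closed under
-- "all supports are removed or fall").  The membership hypothesis is phrased with
-- `d ∉ removed →` to keep the recursive occurrence strictly positive.
inductive PvFalls (dependencies : List (List Int)) (floor_bricks : List Int) : List Int → Int → Prop where
  | intro (removed : List Int) (i : Int)
      (h1 : 0 ≤ i) (h2 : i < (dependencies.length : Int))
      (h3 : i ∉ removed) (h4 : i ∉ floor_bricks)
      (h5 : ∀ d ∈ PySem.List.pyGetD dependencies i [],
            d ∉ removed → PvFalls dependencies floor_bricks removed d) :
      PvFalls dependencies floor_bricks removed i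

def pvCand (dependencies : List (List Int)) (floor_bricks removed : List Int) (i : Int) : Prop :=
  0 ≤ i ∧ i < (dependencies.length : Int) ∧ i ∉ removed ∧ i ∉ floor_bricks

noncomputable def pvCard (dependencies : List (List Int)) (floor_bricks removed : List Int) : Int :=
  ((Set.ncard {i : Int | PvFalls dependencies floor_bricks removed i}) : Int)

lemma pvFalls_finite (dependencies : List (List Int)) (floor_bricks removed : List Int) :
    {i : Int | PvFalls dependencies floor_bricks removed i}.Finite := by
  apply Set.Finite.subset (Set.finite_Ico (0 : Int) (dependencies.length : Int))
  intro i hi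
  exact match hi with
  | .intro _ _ h1 h2 _ _ _ => ⟨h1, h2⟩

lemma diff_len_zero_iff (l r : List Int) :
    (PySem.Set.diff (PySem.Set.ofList l) r).length = 0 ↔ ∀ d ∈ l, d ∈ r := by
  rw [List.length_eq_zero_iff, List.eq_nil_iff_forall_not_mem]
  constructor
  · intro h d hd
    by_contra hdr
    exact h d (by rw [PySem.Set.mem_diff, PySem.Set.mem_ofList]; exact ⟨hd, hdr⟩)
  · intro h d hd
    rw [PySem.Set.mem_diff, PySem.Set.mem_ofList] at hd
    exact hd.2 (h d hd.1)


-- canonical form of A's round body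
lemma pvUnsup_step_eq (dependencies : List (List Int)) (floor_bricks removed : List Int) :
    (fun (unsupported : List Int) (idx : Int) =>
      if idx ∈ removed then unsupported
      else if idx ∈ floor_bricks then unsupported
      else if 0 < (PySem.Set.diff (PySem.Set.ofList (PySem.List.pyGetD dependencies idx [])) removed).length
        then unsupported
        else PySem.Set.add unsupported idx)
    = fun (unsupported : List Int) (idx : Int) =>
      if idx ∉ removed ∧ idx ∉ floor_bricks ∧ ∀ d ∈ PySem.List.pyGetD dependencies idx [], d ∈ removed
        then PySem.Set.add unsupported idx else unsupported := by
  funext u idx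
  by_cases h1 : idx ∈ removed
  · simp [h1]
  · by_cases h2 : idx ∈ floor_bricks
    · simp [h1, h2]
    · by_cases h3 : ∀ d ∈ PySem.List.pyGetD dependencies idx [], d ∈ removed
      · have hz : (PySem.Set.diff (PySem.Set.ofList (PySem.List.pyGetD dependencies idx [])) removed).length = 0 :=
          (diff_len_zero_iff _ _).2 h3
        have hlt : ¬ 0 < (PySem.Set.diff (PySem.Set.ofList (PySem.List.pyGetD dependencies idx [])) removed).length := by omega
        rw [if_neg h1, if_neg h2, if_neg hlt, if_pos ⟨h1, h2, h3⟩]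
      · have hz : (PySem.Set.diff (PySem.Set.ofList (PySem.List.pyGetD dependencies idx [])) removed).length ≠ 0 := by
          intro h0
          exact h3 ((diff_len_zero_iff _ _).1 h0)
        rw [if_neg h1, if_neg h2, if_pos (Nat.pos_of_ne_zero hz),
          if_neg (fun hc => h3 hc.2.2)]

-- generic "conditionally add to a Set" loop
lemma foldl_setadd_spec (p : Int → Prop) [DecidablePred p] (L : List Int) :
    ∀ u : List Int, u.Nodup →
      (L.foldl (fun u x => if p x then PySem.Set.add u x else u) u).Nodup ∧
      ∀ y, y ∈ L.foldl (fun u x => if p x then PySem.Set.add u x else u) u ↔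
        y ∈ u ∨ (y ∈ L ∧ p y) := by
  induction L with
  | nil => intro u hu; simp [hu]
  | cons a L ih =>
    intro u hu
    simp only [List.foldl_cons]
    by_cases ha : p a
    · rw [if_pos ha]
      obtain ⟨hn, hm⟩ := ih (PySem.Set.add u a) (PySem.Set.nodup_add u a hu)
      refine ⟨hn, fun y => ?_⟩
      rw [hm y, PySem.Set.mem_add]
      constructor
      · rintro ((hy | rfl) | ⟨hyL, hyp⟩)
        · exact Or.inl hy
        · exact Or.inr ⟨List.mem_cons_self, ha⟩
        · exact Or.inr ⟨List.mem_cons_of_mem a hyL, hyp⟩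
      · rintro (hy | ⟨hyL, hyp⟩)
        · exact Or.inl (Or.inl hy)
        · rcases List.mem_cons.1 hyL with rfl | hyL
          · exact Or.inl (Or.inr rfl)
          · exact Or.inr ⟨hyL, hyp⟩
    · rw [if_neg ha]
      obtain ⟨hn, hm⟩ := ih u hu
      refine ⟨hn, fun y => ?_⟩
      rw [hm y]
      constructor
      · rintro (hy | ⟨hyL, hyp⟩)
        · exact Or.inl hy
        · exact Or.inr ⟨List.mem_cons_of_mem a hyL, hyp⟩
      · rintro (hy | ⟨hyL, hyp⟩)
        · exact Or.inl hy
        · rcases List.mem_cons.1 hyL with rfl | hyL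
          · exact absurd hyp ha
          · exact Or.inr ⟨hyL, hyp⟩

lemma mem_pvUnsupported (dependencies : List (List Int)) (floor_bricks removed : List Int) (x : Int) :
    x ∈ pvUnsupported dependencies floor_bricks removed ↔
      pvCand dependencies floor_bricks removed x ∧
        ∀ d ∈ PySem.List.pyGetD dependencies x [], d ∈ removed := by
  unfold pvUnsupported
  rw [pvUnsup_step_eq]
  obtain ⟨-, hm⟩ := foldl_setadd_spec
    (fun idx => idx ∉ removed ∧ idx ∉ floor_bricks ∧ ∀ d ∈ PySem.List.pyGetD dependencies idx [], d ∈ removed)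
    (PySem.List.pyRange 0 (dependencies.length : Int) 1) PySem.Set.empty (by simp [PySem.Set.empty])
  rw [hm x]
  simp only [PySem.Set.empty, List.not_mem_nil, false_or, PySem.List.mem_pyRange_one, pvCand]
  tauto

lemma nodup_pvUnsupported (dependencies : List (List Int)) (floor_bricks removed : List Int) :
    (pvUnsupported dependencies floor_bricks removed).Nodup := by
  unfold pvUnsupported
  rw [pvUnsup_step_eq]
  exact (foldl_setadd_spec _ _ PySem.Set.empty (by simp [PySem.Set.empty])).1

-- destructor for PvFalls
lemma pvFalls_elim {dependencies : List (List Int)} {floor_bricks removed : List Int} {i : Int}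
    (h : PvFalls dependencies floor_bricks removed i) :
    pvCand dependencies floor_bricks removed i ∧
      ∀ d ∈ PySem.List.pyGetD dependencies i [], d ∉ removed → PvFalls dependencies floor_bricks removed d :=
  match h with
  | .intro _ _ h1 h2 h3 h4 h5 => ⟨⟨h1, h2, h3, h4⟩, h5⟩

lemma falls_of_mem_unsup (dependencies : List (List Int)) (floor_bricks removed : List Int) (i : Int)
    (h : i ∈ pvUnsupported dependencies floor_bricks removed) :
    PvFalls dependencies floor_bricks removed i := by
  obtain ⟨⟨h1, h2, h3, h4⟩, hall⟩ := (mem_pvUnsupported _ _ _ _).1 h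
  exact .intro removed i h1 h2 h3 h4 (fun d hd hdr => absurd (hall d hd) hdr)

-- going back from removed ∪ U to removed
lemma falls_of_union (dependencies : List (List Int)) (floor_bricks : List Int) :
    ∀ {r : List Int} {i : Int}, PvFalls dependencies floor_bricks r i →
      ∀ removed : List Int,
        (∀ x : Int, x ∈ r ↔ x ∈ removed ∨ x ∈ pvUnsupported dependencies floor_bricks removed) →
        PvFalls dependencies floor_bricks removed i := by
  intro r i h
  induction h with
  | intro j h1 h2 h3 h4 h5 ih =>
    intro removed hiff
    refine .intro removed j h1 h2 (fun hj => h3 ((hiff j).2 (Or.inl hj))) h4 ?_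
    intro d hd hdrm
    by_cases hdU : d ∈ pvUnsupported dependencies floor_bricks removed
    · exact falls_of_mem_unsup dependencies floor_bricks removed d hdU
    · refine ih d hd ?_ removed hiff
      intro hdr
      rcases (hiff d).1 hdr with h | h
      · exact hdrm h
      · exact hdU h

lemma falls_split (dependencies : List (List Int)) (floor_bricks : List Int) :
    ∀ {r : List Int} {i : Int}, PvFalls dependencies floor_bricks r i →
      ∀ removed : List Int, r = removed →
        i ∈ pvUnsupported dependencies floor_bricks removed ∨
        PvFalls dependencies floor_bricks
          (PySem.Set.union (PySem.Set.ofList removed) (pvUnsupported dependencies floor_bricks removed)) i := by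
  intro r i h
  induction h with
  | intro j h1 h2 h3 h4 h5 ih =>
    intro removed heq
    symm at heq
    subst heq
    by_cases hU : j ∈ pvUnsupported dependencies floor_bricks removed
    · exact Or.inl hU
    · right
      refine .intro _ j h1 h2 ?_ h4 ?_
      · rw [PySem.Set.mem_union, PySem.Set.mem_ofList]
        rintro (hj | hj)
        · exact h3 hj
        · exact hU hj
      · intro d hd hdR
        rw [PySem.Set.mem_union, PySem.Set.mem_ofList] at hdR
        push_neg at hdR
        rcases ih d hd hdR.1 removed rfl with hdU | hF
        · exact absurd hdU hdR.2
        · exact hF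

lemma falls_empty (dependencies : List (List Int)) (floor_bricks : List Int) :
    ∀ {r : List Int} {i : Int}, PvFalls dependencies floor_bricks r i →
      ∀ removed : List Int, r = removed →
        pvUnsupported dependencies floor_bricks removed = [] → False := by
  intro r i h
  induction h with
  | intro j h1 h2 h3 h4 h5 ih =>
    intro removed heq hU
    symm at heq
    subst heq
    have hall : ∀ d ∈ PySem.List.pyGetD dependencies j [], d ∈ removed := by
      intro d hd
      by_contra hdr
      exact ih d hd hdr removed rfl hU
    have : j ∈ pvUnsupported dependencies floor_bricks removed :=
      (mem_pvUnsupported _ _ _ _).2 ⟨⟨h1, h2, h3, h4⟩, hall⟩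
    rw [hU] at this
    exact List.not_mem_nil this

lemma pvCard_zero (dependencies : List (List Int)) (floor_bricks removed : List Int)
    (hU : pvUnsupported dependencies floor_bricks removed = []) :
    pvCard dependencies floor_bricks removed = 0 := by
  have : {i : Int | PvFalls dependencies floor_bricks removed i} = ∅ := by
    rw [Set.eq_empty_iff_forall_notMem]
    intro i hi
    exact falls_empty dependencies floor_bricks hi removed rfl hU
  simp [pvCard, this]

lemma pvCard_step (dependencies : List (List Int)) (floor_bricks removed : List Int) :
    pvCard dependencies floor_bricks removed =
      ((pvUnsupported dependencies floor_bricks removed).length : Int) +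
      pvCard dependencies floor_bricks
        (PySem.Set.union (PySem.Set.ofList removed) (pvUnsupported dependencies floor_bricks removed)) := by
  set U := pvUnsupported dependencies floor_bricks removed with hUdef
  set R' := PySem.Set.union (PySem.Set.ofList removed) U with hRdef
  have hiff : ∀ x : Int, x ∈ R' ↔ x ∈ removed ∨ x ∈ U := by
    intro x
    rw [hRdef, PySem.Set.mem_union, PySem.Set.mem_ofList]
  have hset : {i : Int | PvFalls dependencies floor_bricks removed i} =
      {i : Int | i ∈ U} ∪ {i : Int | PvFalls dependencies floor_bricks R' i} := by
    ext i
    simp only [Set.mem_setOf_eq, Set.mem_union]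
    constructor
    · intro h
      exact falls_split dependencies floor_bricks h removed rfl
    · rintro (h | h)
      · exact falls_of_mem_unsup dependencies floor_bricks removed i h
      · exact falls_of_union dependencies floor_bricks h removed hiff
  have hdisj : Disjoint {i : Int | i ∈ U} {i : Int | PvFalls dependencies floor_bricks R' i} := by
    rw [Set.disjoint_left]
    intro i hiU hiF
    obtain ⟨⟨-, -, h3, -⟩, -⟩ := pvFalls_elim hiF
    exact h3 ((hiff i).2 (Or.inr hiU))
  have hfinU : {i : Int | i ∈ U}.Finite := U.finite_toSet.subset (by intro x hx; exact hx)
  have hcard : Set.ncard {i : Int | i ∈ U} = U.length := by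
    rw [show {i : Int | i ∈ U} = (U.toFinset : Set Int) by simp]
    rw [Set.ncard_coe_finset]
    exact List.toFinset_card_of_nodup (nodup_pvUnsupported dependencies floor_bricks removed)
  rw [pvCard, hset, Set.ncard_union_eq hdisj hfinU (pvFalls_finite dependencies floor_bricks R'), hcard,
    pvCard]
  push_cast
  ring

-- the A-side termination measure
noncomputable def pvRem (dependencies : List (List Int)) (removed : List Int) : Nat :=
  ((Finset.Ico (0 : Int) (dependencies.length : Int)).filter (fun i => i ∉ removed)).card

lemma pvRem_drop (dependencies : List (List Int)) (floor_bricks removed : List Int) :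
    pvRem dependencies
        (PySem.Set.union (PySem.Set.ofList removed) (pvUnsupported dependencies floor_bricks removed)) +
      (pvUnsupported dependencies floor_bricks removed).length = pvRem dependencies removed := by
  classical
  set U := pvUnsupported dependencies floor_bricks removed with hUdef
  set T := (Finset.Ico (0 : Int) (dependencies.length : Int)).filter (fun i => i ∉ removed) with hTdef
  have hsub : U.toFinset ⊆ T := by
    intro x hx
    rw [List.mem_toFinset] at hx
    obtain ⟨⟨h1, h2, h3, -⟩, -⟩ := (mem_pvUnsupported _ _ _ _).1 hx
    rw [hTdef, Finset.mem_filter, Finset.mem_Ico]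
    exact ⟨⟨h1, h2⟩, h3⟩
  have hfil : (Finset.Ico (0 : Int) (dependencies.length : Int)).filter
      (fun i => i ∉ PySem.Set.union (PySem.Set.ofList removed) U) = T \ U.toFinset := by
    ext x
    simp only [Finset.mem_filter, Finset.mem_sdiff, hTdef, List.mem_toFinset, Finset.mem_Ico,
      PySem.Set.mem_union, PySem.Set.mem_ofList]
    tauto
  have hUcard : U.toFinset.card = U.length :=
    List.toFinset_card_of_nodup (nodup_pvUnsupported dependencies floor_bricks removed)
  have hle : U.toFinset.card ≤ T.card := Finset.card_le_card hsub
  rw [pvRem, hfil, Finset.card_sdiff, Finset.inter_eq_left.2 hsub, hUcard]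
  rw [pvRem, ← hTdef]
  omega

lemma A_loop (dependencies : List (List Int)) (floor_bricks : List Int) :
    ∀ (fuel : Nat) (removed : List Int), pvRem dependencies removed ≤ fuel →
      num_fallenFuel dependencies floor_bricks fuel removed = pvCard dependencies floor_bricks removed := by
  intro fuel
  induction fuel with
  | zero =>
    intro removed h
    have hnone : ∀ i : Int, ¬ PvFalls dependencies floor_bricks removed i := by
      intro i hF
      obtain ⟨⟨h1, h2, h3, -⟩, -⟩ := pvFalls_elim hF
      have hmem : i ∈ (Finset.Ico (0 : Int) (dependencies.length : Int)).filter (fun i => i ∉ removed) := by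
        rw [Finset.mem_filter, Finset.mem_Ico]
        exact ⟨⟨h1, h2⟩, h3⟩
      have : 0 < pvRem dependencies removed := Finset.card_pos.2 ⟨i, hmem⟩
      omega
    have hempty : {i : Int | PvFalls dependencies floor_bricks removed i} = ∅ := by
      rw [Set.eq_empty_iff_forall_notMem]
      exact fun i hi => hnone i hi
    simp [num_fallenFuel, pvCard, hempty]
  | succ fuel ih =>
    intro removed h
    simp only [num_fallenFuel]
    by_cases h0 : (pvUnsupported dependencies floor_bricks removed).length = 0
    · rw [if_pos h0]
      exact (pvCard_zero dependencies floor_bricks removed (List.length_eq_zero_iff.1 h0)).symm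
    · rw [if_neg h0]
      have hdrop := pvRem_drop dependencies floor_bricks removed
      have hrec := ih (PySem.Set.union (PySem.Set.ofList removed) (pvUnsupported dependencies floor_bricks removed))
        (by omega)
      rw [hrec, ← pvCard_step]

lemma A_eq (dependencies : List (List Int)) (floor_bricks removed : List Int) :
    num_fallen dependencies floor_bricks removed = pvCard dependencies floor_bricks removed := by
  apply A_loop
  have h1 : pvRem dependencies removed ≤ (Finset.Ico (0 : Int) (dependencies.length : Int)).card :=
    Finset.card_filter_le _ _
  rw [Int.card_Ico] at h1
  simp at h1
  omega

-- ===== B-side lemmas =====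

lemma pvSeed_eq_filter (dependencies : List (List Int)) (floor_bricks removed : List Int) :
    pvSeed dependencies floor_bricks removed =
      (PySem.List.pyRange 0 (dependencies.length : Int) 1).filter
        (fun i => decide (i ∉ removed ∧ i ∉ floor_bricks ∧
          (PySem.List.pyGetD dependencies i []).all (fun d => decide (d ∈ removed)) = true)) := by
  unfold pvSeed
  rw [show (fun (queue : List Int) (i : Int) =>
      if i ∉ removed ∧ i ∉ floor_bricks ∧
          (PySem.List.pyGetD dependencies i []).all (fun d => decide (d ∈ removed)) then
        queue ++ [i]
      else queue)
    = fun (queue : List Int) (i : Int) =>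
      if (decide (i ∉ removed ∧ i ∉ floor_bricks ∧
          (PySem.List.pyGetD dependencies i []).all (fun d => decide (d ∈ removed)) = true)) = true then
        queue ++ [(fun x : Int => x) i]
      else queue from by
      funext q i
      by_cases h : i ∉ removed ∧ i ∉ floor_bricks ∧
          (PySem.List.pyGetD dependencies i []).all (fun d => decide (d ∈ removed)) = true
      · simp [h]
      · simp [h]]
  rw [PySem.List.foldl_append_if]
  simp

lemma mem_pvSeed (dependencies : List (List Int)) (floor_bricks removed : List Int) (x : Int) :
    x ∈ pvSeed dependencies floor_bricks removed ↔
      pvCand dependencies floor_bricks removed x ∧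
        ∀ d ∈ PySem.List.pyGetD dependencies x [], d ∈ removed := by
  rw [pvSeed_eq_filter, List.mem_filter]
  simp only [PySem.List.mem_pyRange_one, decide_eq_true_eq, List.all_eq_true, pvCand]
  tauto

lemma nodup_pvSeed (dependencies : List (List Int)) (floor_bricks removed : List Int) :
    (pvSeed dependencies floor_bricks removed).Nodup := by
  rw [pvSeed_eq_filter]
  exact (PySem.List.nodup_pyRange_one _ _).filter _

-- reverse-index characterisation
lemma rev_inner (i : Int) (ds : List Int) :
    ∀ (rev : PySem.Dict Int (List Int)) (j x : Int),
      x ∈ (ds.foldl (fun rev d => rev.modify d [] (fun l => l ++ [i])) rev).getD j [] ↔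
        x ∈ rev.getD j [] ∨ (x = i ∧ j ∈ ds) := by
  induction ds with
  | nil => intro rev j x; simp
  | cons a ds ih =>
    intro rev j x
    rw [List.foldl_cons, ih, PySem.Dict.getD_modify]
    by_cases hja : j = a
    · subst hja
      rw [if_pos rfl]
      simp only [List.mem_append, List.mem_cons, List.not_mem_nil, or_false]
      constructor
      · rintro ((h | he) | ⟨he, hj⟩)
        · exact Or.inl h
        · exact Or.inr ⟨he, Or.inl trivial⟩
        · exact Or.inr ⟨he, Or.inr hj⟩
      · rintro (h | ⟨he, hj | hj⟩)
        · exact Or.inl (Or.inl h)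
        · exact Or.inl (Or.inr he)
        · exact Or.inr ⟨he, hj⟩
    · rw [if_neg hja]
      simp only [List.mem_cons]
      constructor
      · rintro (h | ⟨he, hj⟩)
        · exact Or.inl h
        · exact Or.inr ⟨he, Or.inr hj⟩
      · rintro (h | ⟨he, hj | hj⟩)
        · exact Or.inl h
        · exact absurd hj hja
        · exact Or.inr ⟨he, hj⟩

lemma mem_rev (dependencies : List (List Int)) (floor_bricks removed : List Int) (j x : Int) :
    x ∈ (pvRev dependencies floor_bricks removed).getD j [] ↔
      pvCand dependencies floor_bricks removed x ∧ j ∈ PySem.List.pyGetD dependencies x [] := by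
  have main : ∀ (L : List Int) (rev : PySem.Dict Int (List Int)),
      x ∈ (L.foldl (fun rev i =>
        if i ∈ removed then rev
        else if i ∈ floor_bricks then rev
        else (PySem.List.pyGetD dependencies i []).foldl
          (fun rev d => rev.modify d [] (fun l => l ++ [i])) rev) rev).getD j [] ↔
        x ∈ rev.getD j [] ∨
          (x ∈ L ∧ x ∉ removed ∧ x ∉ floor_bricks ∧ j ∈ PySem.List.pyGetD dependencies x []) := by
    intro L
    induction L with
    | nil => intro rev; simp
    | cons a L ih =>
      intro rev
      rw [List.foldl_cons]
      by_cases h1 : a ∈ removed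
      · rw [if_pos h1, ih]
        simp only [List.mem_cons]
        constructor
        · rintro (h | ⟨hL, hc⟩)
          · exact Or.inl h
          · exact Or.inr ⟨Or.inr hL, hc⟩
        · rintro (h | ⟨he | hL, hc⟩)
          · exact Or.inl h
          · exfalso
            obtain ⟨hcr, -, -⟩ := hc
            rw [he] at hcr
            exact hcr h1
          · exact Or.inr ⟨hL, hc⟩
      · rw [if_neg h1]
        by_cases h2 : a ∈ floor_bricks
        · rw [if_pos h2, ih]
          simp only [List.mem_cons]
          constructor
          · rintro (h | ⟨hL, hc⟩)
            · exact Or.inl h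
            · exact Or.inr ⟨Or.inr hL, hc⟩
          · rintro (h | ⟨he | hL, hc⟩)
            · exact Or.inl h
            · exfalso
              obtain ⟨-, hcf, -⟩ := hc
              rw [he] at hcf
              exact hcf h2
            · exact Or.inr ⟨hL, hc⟩
        · rw [if_neg h2, ih, rev_inner]
          simp only [List.mem_cons]
          constructor
          · rintro ((h | ⟨he, hj⟩) | ⟨hL, hc⟩)
            · exact Or.inl h
            · refine Or.inr ⟨Or.inl he, ?_, ?_, ?_⟩ <;> rw [he]
              · exact h1
              · exact h2
              · exact hj
            · exact Or.inr ⟨Or.inr hL, hc⟩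
          · rintro (h | ⟨he | hL, hc⟩)
            · exact Or.inl (Or.inl h)
            · refine Or.inl (Or.inr ⟨he, ?_⟩)
              obtain ⟨-, -, hcj⟩ := hc
              rw [← he]
              exact hcj
            · exact Or.inr ⟨hL, hc⟩
  rw [pvRev, main]
  simp only [PySem.Dict.getD_empty, List.not_mem_nil, false_or, PySem.List.mem_pyRange_one, pvCand]
  tauto

lemma nodup_length_le (q : List Int) (n : Nat) (hq : q.Nodup)
    (hb : ∀ x ∈ q, 0 ≤ x ∧ x < (n : Int)) : q.length ≤ n := by
  classical
  have hsub : q.toFinset ⊆ Finset.Ico (0 : Int) (n : Int) := by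
    intro x hx
    rw [List.mem_toFinset] at hx
    rw [Finset.mem_Ico]
    exact hb x hx
  have := Finset.card_le_card hsub
  rw [List.toFinset_card_of_nodup hq, Int.card_Ico] at this
  omega

lemma all_check_iff (dependencies : List (List Int)) (removed q : List Int) (i : Int) :
    ((PySem.List.pyGetD dependencies i []).all
        (fun d => decide (d ∈ removed) || decide (d ∈ q)) = true) ↔
      ∀ d ∈ PySem.List.pyGetD dependencies i [], d ∈ removed ∨ d ∈ q := by
  simp [List.all_eq_true]

-- the inner worklist scan (one popped brick)
lemma bfs_fold (dependencies : List (List Int)) (floor_bricks removed : List Int) (L T : List Int)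
    (hL : ∀ x ∈ L, pvCand dependencies floor_bricks removed x) :
    ∀ q : List Int, q.Nodup → (∀ x ∈ q, PvFalls dependencies floor_bricks removed x) →
      (∀ x ∈ T, x ∈ q) →
      (q <+: (L.foldl (fun q i =>
          if i ∈ q then q
          else if (PySem.List.pyGetD dependencies i []).all
              (fun d => decide (d ∈ removed) || decide (d ∈ q)) then q ++ [i]
          else q) q)) ∧
      (L.foldl (fun q i =>
          if i ∈ q then q
          else if (PySem.List.pyGetD dependencies i []).all
              (fun d => decide (d ∈ removed) || decide (d ∈ q)) then q ++ [i]
          else q) q).Nodup ∧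
      (∀ x ∈ (L.foldl (fun q i =>
          if i ∈ q then q
          else if (PySem.List.pyGetD dependencies i []).all
              (fun d => decide (d ∈ removed) || decide (d ∈ q)) then q ++ [i]
          else q) q), PvFalls dependencies floor_bricks removed x) ∧
      (∀ x ∈ (L.foldl (fun q i =>
          if i ∈ q then q
          else if (PySem.List.pyGetD dependencies i []).all
              (fun d => decide (d ∈ removed) || decide (d ∈ q)) then q ++ [i]
          else q) q), x ∈ q ∨ x ∈ L) ∧
      (∀ i ∈ L, (∀ d ∈ PySem.List.pyGetD dependencies i [], d ∈ removed ∨ d ∈ T) →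
        i ∈ (L.foldl (fun q i =>
          if i ∈ q then q
          else if (PySem.List.pyGetD dependencies i []).all
              (fun d => decide (d ∈ removed) || decide (d ∈ q)) then q ++ [i]
          else q) q)) := by
  induction L with
  | nil =>
    intro q hnd hsound hT
    simp only [List.foldl_nil]
    exact ⟨List.prefix_refl q, hnd, hsound, fun x hx => Or.inl hx, fun i hi => absurd hi List.not_mem_nil⟩
  | cons a L ihL =>
    intro q hnd hsound hT
    simp only [List.foldl_cons]
    by_cases hmem : a ∈ q
    · rw [if_pos hmem]
      obtain ⟨hpre, hnd', hsound', hsub', hc5⟩ :=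
        ihL (fun x hx => hL x (List.mem_cons_of_mem a hx)) q hnd hsound hT
      refine ⟨hpre, hnd', hsound', ?_, ?_⟩
      · intro x hx
        rcases hsub' x hx with h | h
        · exact Or.inl h
        · exact Or.inr (List.mem_cons_of_mem a h)
      · intro i hi hdep
        rcases List.mem_cons.1 hi with rfl | hi
        · exact hpre.subset hmem
        · exact hc5 i hi hdep
    · rw [if_neg hmem]
      by_cases hchk : (PySem.List.pyGetD dependencies a []).all
          (fun d => decide (d ∈ removed) || decide (d ∈ q)) = true
      · rw [if_pos hchk]
        have hndq1 : (q ++ [a]).Nodup := by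
          rw [List.nodup_append]
          refine ⟨hnd, List.nodup_singleton a, ?_⟩
          intro y hy b hb
          rw [List.mem_singleton] at hb
          intro he
          rw [he, hb] at hy
          exact hmem hy
        have hsound1 : ∀ x ∈ q ++ [a], PvFalls dependencies floor_bricks removed x := by
          intro x hx
          rcases List.mem_append.1 hx with hx | hx
          · exact hsound x hx
          · rw [List.mem_singleton] at hx
            subst hx
            obtain ⟨h1, h2, h3, h4⟩ := hL x List.mem_cons_self
            refine .intro removed x h1 h2 h3 h4 ?_
            intro d hd hdr
            rcases (all_check_iff dependencies removed q x).1 hchk d hd with h | h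
            · exact absurd h hdr
            · exact hsound d h
        have hT1 : ∀ x ∈ T, x ∈ q ++ [a] := fun x hx => List.mem_append.2 (Or.inl (hT x hx))
        obtain ⟨hpre, hnd', hsound', hsub', hc5⟩ :=
          ihL (fun x hx => hL x (List.mem_cons_of_mem a hx)) (q ++ [a]) hndq1 hsound1 hT1
        refine ⟨(List.prefix_append q [a]).trans hpre, hnd', hsound', ?_, ?_⟩
        · intro x hx
          rcases hsub' x hx with h | h
          · rcases List.mem_append.1 h with h | h
            · exact Or.inl h
            · rw [List.mem_singleton] at h
              exact Or.inr (h ▸ List.mem_cons_self)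
          · exact Or.inr (List.mem_cons_of_mem a h)
        · intro i hi hdep
          rcases List.mem_cons.1 hi with rfl | hi
          · exact hpre.subset (List.mem_append.2 (Or.inr List.mem_cons_self))
          · exact hc5 i hi hdep
      · rw [if_neg hchk]
        obtain ⟨hpre, hnd', hsound', hsub', hc5⟩ :=
          ihL (fun x hx => hL x (List.mem_cons_of_mem a hx)) q hnd hsound hT
        refine ⟨hpre, hnd', hsound', ?_, ?_⟩
        · intro x hx
          rcases hsub' x hx with h | h
          · exact Or.inl h
          · exact Or.inr (List.mem_cons_of_mem a h)
        · intro i hi hdep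
          rcases List.mem_cons.1 hi with rfl | hi
          · exfalso
            apply hchk
            rw [all_check_iff]
            intro d hd
            rcases hdep d hd with h | h
            · exact Or.inl h
            · exact Or.inr (hT d h)
          · exact hc5 i hi hdep

lemma bfs_main (dependencies : List (List Int)) (floor_bricks removed : List Int) :
    ∀ (fuel head : Nat) (q : List Int),
      q.Nodup →
      (∀ x ∈ q, pvCand dependencies floor_bricks removed x) →
      (∀ x ∈ q, PvFalls dependencies floor_bricks removed x) →
      head ≤ q.length →
      (∀ i, pvCand dependencies floor_bricks removed i →
        (∀ d ∈ PySem.List.pyGetD dependencies i [], d ∈ removed ∨ d ∈ q.take head) → i ∈ q) →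
      dependencies.length - head ≤ fuel →
      ((pvBfs dependencies removed (pvRev dependencies floor_bricks removed) fuel head q).Nodup ∧
       (∀ x ∈ pvBfs dependencies removed (pvRev dependencies floor_bricks removed) fuel head q,
          PvFalls dependencies floor_bricks removed x) ∧
       (∀ i, pvCand dependencies floor_bricks removed i →
          (∀ d ∈ PySem.List.pyGetD dependencies i [],
            d ∈ removed ∨ d ∈ pvBfs dependencies removed (pvRev dependencies floor_bricks removed) fuel head q) →
          i ∈ pvBfs dependencies removed (pvRev dependencies floor_bricks removed) fuel head q)) := by
  intro fuel
  induction fuel with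
  | zero =>
    intro head q hnd hcand hsound hhead hclosed hfuel
    have hlen : q.length ≤ dependencies.length :=
      nodup_length_le q dependencies.length hnd (fun x hx => ⟨(hcand x hx).1, (hcand x hx).2.1⟩)
    have hhq : head = q.length := by omega
    simp only [pvBfs]
    refine ⟨hnd, hsound, ?_⟩
    intro i hc hdep
    apply hclosed i hc
    rw [hhq, List.take_length]
    exact hdep
  | succ fuel ih =>
    intro head q hnd hcand hsound hhead hclosed hfuel
    simp only [pvBfs]
    by_cases h : head < q.length
    · rw [dif_pos h]
      have hjq : q[head] ∈ q := List.getElem_mem h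
      have hLrev : ∀ x ∈ (pvRev dependencies floor_bricks removed).getD q[head] [],
          pvCand dependencies floor_bricks removed x :=
        fun x hx => ((mem_rev dependencies floor_bricks removed q[head] x).1 hx).1
      have hT : ∀ x ∈ q.take head ++ [q[head]], x ∈ q := by
        intro x hx
        rcases List.mem_append.1 hx with hx | hx
        · exact List.take_subset head q hx
        · rw [List.mem_singleton] at hx
          exact hx ▸ hjq
      obtain ⟨hpre, hnd', hsound', hsub', hc5⟩ :=
        bfs_fold dependencies floor_bricks removed
          ((pvRev dependencies floor_bricks removed).getD q[head] []) (q.take head ++ [q[head]])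
          hLrev q hnd hsound hT
      set q' := ((pvRev dependencies floor_bricks removed).getD q[head] []).foldl
        (fun q i =>
          if i ∈ q then q
          else if (PySem.List.pyGetD dependencies i []).all
              (fun d => decide (d ∈ removed) || decide (d ∈ q)) then q ++ [i]
          else q) q with hq'def
      have hcand' : ∀ x ∈ q', pvCand dependencies floor_bricks removed x := by
        intro x hx
        rcases hsub' x hx with hx | hx
        · exact hcand x hx
        · exact hLrev x hx
      have hlen' : q.length ≤ q'.length := hpre.length_le
      have htake : q'.take (head + 1) = q.take head ++ [q[head]] := by
        obtain ⟨ext, hext⟩ := hpre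
        rw [← hext, List.take_append_of_le_length (by omega), List.take_succ,
          List.getElem?_eq_getElem h]
        rfl
      have hclosed' : ∀ i, pvCand dependencies floor_bricks removed i →
          (∀ d ∈ PySem.List.pyGetD dependencies i [], d ∈ removed ∨ d ∈ q'.take (head + 1)) →
          i ∈ q' := by
        intro i hc hdep
        rw [htake] at hdep
        by_cases hold : ∀ d ∈ PySem.List.pyGetD dependencies i [], d ∈ removed ∨ d ∈ q.take head
        · exact hpre.subset (hclosed i hc hold)
        · push_neg at hold
          obtain ⟨d, hd, hdr, hdt⟩ := hold
          rcases hdep d hd with hdrem | hdT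
          · exact absurd hdrem hdr
          · rcases List.mem_append.1 hdT with hdT | hdT
            · exact absurd hdT hdt
            · rw [List.mem_singleton] at hdT
              have hirev : i ∈ (pvRev dependencies floor_bricks removed).getD d [] :=
                (mem_rev dependencies floor_bricks removed d i).2 ⟨hc, hd⟩
              rw [hdT] at hirev
              exact hc5 i hirev hdep
      have hlenq : q.length ≤ dependencies.length :=
        nodup_length_le q dependencies.length hnd (fun x hx => ⟨(hcand x hx).1, (hcand x hx).2.1⟩)
      exact ih (head + 1) q' hnd' hcand' hsound' (by omega) hclosed' (by omega)
    · rw [dif_neg h]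
      have hhq : head = q.length := by omega
      refine ⟨hnd, hsound, ?_⟩
      intro i hc hdep
      apply hclosed i hc
      rw [hhq, List.take_length]
      exact hdep

lemma falls_mem_closed (dependencies : List (List Int)) (floor_bricks : List Int) (S : List Int)
    (removed : List Int)
    (hclosed : ∀ i, pvCand dependencies floor_bricks removed i →
      (∀ d ∈ PySem.List.pyGetD dependencies i [], d ∈ removed ∨ d ∈ S) → i ∈ S) :
    ∀ {r : List Int} {i : Int}, PvFalls dependencies floor_bricks r i → r = removed → i ∈ S := by
  intro r i h
  induction h with
  | intro j h1 h2 h3 h4 h5 ih =>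
    intro heq
    symm at heq
    subst heq
    refine hclosed j ⟨h1, h2, h3, h4⟩ ?_
    intro d hd
    by_cases hdr : d ∈ removed
    · exact Or.inl hdr
    · exact Or.inr (ih d hd hdr rfl)

lemma B_eq (dependencies : List (List Int)) (floor_bricks removed : List Int) :
    num_fallen_alt dependencies floor_bricks removed = pvCard dependencies floor_bricks removed := by
  have hndseed := nodup_pvSeed dependencies floor_bricks removed
  have hcand0 : ∀ x ∈ pvSeed dependencies floor_bricks removed,
      pvCand dependencies floor_bricks removed x :=
    fun x hx => ((mem_pvSeed dependencies floor_bricks removed x).1 hx).1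
  have hsound0 : ∀ x ∈ pvSeed dependencies floor_bricks removed,
      PvFalls dependencies floor_bricks removed x := by
    intro x hx
    obtain ⟨⟨h1, h2, h3, h4⟩, hall⟩ := (mem_pvSeed dependencies floor_bricks removed x).1 hx
    exact .intro removed x h1 h2 h3 h4 (fun d hd hdr => absurd (hall d hd) hdr)
  have hclosed0 : ∀ i, pvCand dependencies floor_bricks removed i →
      (∀ d ∈ PySem.List.pyGetD dependencies i [],
        d ∈ removed ∨ d ∈ (pvSeed dependencies floor_bricks removed).take 0) →
      i ∈ pvSeed dependencies floor_bricks removed := by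
    intro i hc hdep
    apply (mem_pvSeed dependencies floor_bricks removed i).2
    refine ⟨hc, fun d hd => ?_⟩
    rcases hdep d hd with h | h
    · exact h
    · simp at h
  obtain ⟨hnd, hsound, hclosed⟩ :=
    bfs_main dependencies floor_bricks removed dependencies.length 0
      (pvSeed dependencies floor_bricks removed) hndseed hcand0 hsound0 (by omega) hclosed0 (by omega)
  set qf := pvBfs dependencies removed (pvRev dependencies floor_bricks removed)
    dependencies.length 0 (pvSeed dependencies floor_bricks removed) with hqf
  have hset : {i : Int | PvFalls dependencies floor_bricks removed i} = {i : Int | i ∈ qf} := by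
    ext i
    simp only [Set.mem_setOf_eq]
    constructor
    · intro hF
      exact falls_mem_closed dependencies floor_bricks qf removed hclosed hF rfl
    · exact hsound i
  have hcard : pvCard dependencies floor_bricks removed = (qf.length : Int) := by
    rw [pvCard, hset, show {i : Int | i ∈ qf} = (qf.toFinset : Set Int) by simp,
      Set.ncard_coe_finset, List.toFinset_card_of_nodup hnd]
  rw [hcard]
  rfl

-- ===== VERDICT (by name: the statement is the Claim_ definition above) =====
theorem num_fallen_spec : Claim_equal_num_fallen := by
  intro dependencies floor_bricks removed _
  show num_fallen dependencies floor_bricks removed = num_fallen_alt dependencies floor_bricks removed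
  rw [A_eq, B_eq]
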